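-- pv_equiv track=rewrite | github.com/mr2rm/solutions | HackerRank/Hack the Interview II - Global/Minimum_String_Co_Efficient.py | calc
-- ===== SOURCE A (Python) =====
-- def calc(s, c):
--     s = s.rstrip(s[-1])
--
--     dp = [0]
--     n, i = len(s), 0
--     while i < n:
--         j = i
--         while j < n and s[j] != c:
--             j += 1
--
--         k = j
--         while k < n and s[k] == c:
--             k += 1
--
--         x, y = j - i, k - j
--         if i > 0:
--             cur = dp[-1] + x + y
--             dp.append(cur)
--         elif x != 0:
--             dp.append(y)
--         i = k
--
--     return dp
-- ===== SOURCE B (Python) =====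
-- def calc(s, c):
--     s = s.rstrip(s[-1])
--
--     # pass 1: run-length encode s by whether each char equals c
--     runs = []
--     for ch in s:
--         key = (ch == c)
--         if runs and runs[-1][0] == key:
--             runs[-1][1] += 1
--         else:
--             runs.append([key, 1])
--
--     # pass 2: pair each non-c gap with its following c-run
--     dp = [0]
--     i, first = 0, True
--     while i < len(runs):
--         if runs[i][0]:
--             x, y = 0, runs[i][1]
--             i += 1
--         elif i + 1 < len(runs):
--             x, y = runs[i][1], runs[i + 1][1]
--             i += 2
--         else:
--             x, y = runs[i][1], 0
--             i += 1
--         if not first: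
--             dp.append(dp[-1] + x + y)
--         elif x != 0:
--             dp.append(y)
--         first = False
--     return dp
-- ===== Notes on version B (the rewrite author's own statement) =====
-- stated objective: alternative
-- what changed: Replaces A's single index-juggling while-loop with three nested scans by a two-pass decomposition: first a run-length encoding of the string by 'char == c', then one pass over the run list pairing each non-c gap with its following c-run; Pre_ excludes only the empty string, where both raise IndexError at s[-1].
import Mathlib
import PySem

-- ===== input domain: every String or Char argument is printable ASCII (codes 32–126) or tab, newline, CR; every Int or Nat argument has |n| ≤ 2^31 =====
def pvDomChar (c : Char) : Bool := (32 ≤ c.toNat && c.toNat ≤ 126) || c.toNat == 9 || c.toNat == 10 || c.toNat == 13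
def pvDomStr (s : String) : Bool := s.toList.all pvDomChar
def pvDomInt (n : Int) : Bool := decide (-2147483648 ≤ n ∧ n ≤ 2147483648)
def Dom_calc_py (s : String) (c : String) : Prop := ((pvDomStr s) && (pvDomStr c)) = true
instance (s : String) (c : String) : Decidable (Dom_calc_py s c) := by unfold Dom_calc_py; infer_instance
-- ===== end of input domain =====

-- B re-implements A's single index-juggling scan as two passes (run-length encode by 'char == c',
-- then pair each non-c gap with its following c-run); same cost, different decomposition.


-- shared by both ports: Python's s.rstrip(ch) for a ONE-character strip set (exact there):
-- drop trailing characters equal to ch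
def pvRstripChar (t : List Char) (ch : Char) : List Char :=
  (t.reverse.dropWhile (fun d => d == ch)).reverse

-- ===== PORT A =====
-- inner while: `while j < n and s[j] != c: j += 1`
def calcA_skipNot (t : List Char) (cl : List Char) (n j : Nat) : Nat :=
  if h : j < n ∧ ¬ ([t.getD j ' '] = cl) then calcA_skipNot t cl n (j + 1) else j
termination_by n - j
decreasing_by omega

-- inner while: `while k < n and s[k] == c: k += 1`
def calcA_skipC (t : List Char) (cl : List Char) (n k : Nat) : Nat :=
  if h : k < n ∧ [t.getD k ' '] = cl then calcA_skipC t cl n (k + 1) else k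
termination_by n - k
decreasing_by omega

theorem calcA_skipNot_ge (t : List Char) (cl : List Char) (n j : Nat) :
    j ≤ calcA_skipNot t cl n j := by
  fun_induction calcA_skipNot with
  | case1 j h ih => omega
  | case2 j h => omega

theorem calcA_skipC_ge (t : List Char) (cl : List Char) (n k : Nat) :
    k ≤ calcA_skipC t cl n k := by
  fun_induction calcA_skipC with
  | case1 k h ih => omega
  | case2 k h => omega

-- progress of the outer while-loop: k > i whenever the loop body runs
theorem calcA_progress (t : List Char) (cl : List Char) (n i : Nat) (hi : i < n) :
    i < calcA_skipC t cl n (calcA_skipNot t cl n i) := by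
  by_cases hc : [t.getD i ' '] = cl
  · have hj : calcA_skipNot t cl n i = i := by
      rw [calcA_skipNot, dif_neg (fun h => h.2 hc)]
    rw [hj]
    have hstep : calcA_skipC t cl n i = calcA_skipC t cl n (i + 1) := by
      rw [calcA_skipC, dif_pos ⟨hi, hc⟩]
    rw [hstep]
    have := calcA_skipC_ge t cl n (i + 1)
    omega
  · have hj : calcA_skipNot t cl n i = calcA_skipNot t cl n (i + 1) := by
      rw [calcA_skipNot, dif_pos ⟨hi, hc⟩]
    have h1 := calcA_skipNot_ge t cl n (i + 1)
    have h2 := calcA_skipC_ge t cl n (calcA_skipNot t cl n i)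
    omega

-- outer while loop of A
def calcA_loop (t : List Char) (cl : List Char) (n : Nat) (dp : List Int) (i : Nat) : List Int :=
  if h : i < n then
    let j := calcA_skipNot t cl n i
    let k := calcA_skipC t cl n j
    let x : Int := (j : Int) - (i : Int)
    let y : Int := (k : Int) - (j : Int)
    let dp' := if i > 0 then dp ++ [dp.getLast! + x + y]
               else if x ≠ 0 then dp ++ [y] else dp
    calcA_loop t cl n dp' k
  else dp
termination_by n - i
decreasing_by
  have := calcA_progress t cl n i h
  omega

def calc_py (s : String) (c : String) : List Int :=
  let t := pvRstripChar s.toList ((PySem.List.pyGet? s.toList (-1)).getD ' ')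
  calcA_loop t c.toList t.length [0] 0

-- ===== PORT B =====
-- pass 1 loop body: extend the last run or start a new one
def calcB_step (cl : List Char) (runs : List (Bool × Int)) (ch : Char) : List (Bool × Int) :=
  let key : Bool := decide ([ch] = cl)
  match runs.getLast? with
  | some (k', cnt) =>
      if k' = key then runs.dropLast ++ [(key, cnt + 1)] else runs ++ [(key, 1)]
  | none => runs ++ [(key, 1)]

def calcB_runs (t : List Char) (cl : List Char) : List (Bool × Int) :=
  t.foldl (calcB_step cl) []

-- pass 2: one step of the pairing loop returns (x, y, next index)
def calcB_take (runs : List (Bool × Int)) (i : Nat) : Int × Int × Nat :=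
  if (runs.getD i (false, 0)).1 then (0, (runs.getD i (false, 0)).2, i + 1)
  else if i + 1 < runs.length then
    ((runs.getD i (false, 0)).2, (runs.getD (i + 1) (false, 0)).2, i + 2)
  else ((runs.getD i (false, 0)).2, 0, i + 1)

theorem calcB_take_gt (runs : List (Bool × Int)) (i : Nat) : i < (calcB_take runs i).2.2 := by
  unfold calcB_take
  split
  · exact Nat.lt_succ_self i
  · split
    · show i < i + 2
      omega
    · exact Nat.lt_succ_self i

def calcB_loop (runs : List (Bool × Int)) (dp : List Int) (i : Nat) (first : Bool) : List Int :=
  if h : i < runs.length then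
    let xyn := calcB_take runs i
    let dp' := if !first then dp ++ [dp.getLast! + xyn.1 + xyn.2.1]
               else if xyn.1 ≠ 0 then dp ++ [xyn.2.1] else dp
    calcB_loop runs dp' xyn.2.2 false
  else dp
termination_by runs.length - i
decreasing_by
  have := calcB_take_gt runs i
  omega

def calc_py_alt (s : String) (c : String) : List Int :=
  let t := pvRstripChar s.toList ((PySem.List.pyGet? s.toList (-1)).getD ' ')
  calcB_loop (calcB_runs t c.toList) [0] 0 true

-- ===== PRECONDITION & SPEC =====
-- Pre_ excludes exactly the empty string s, on which A raises IndexError at s[-1]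
-- (and B raises there identically).
def Pre_calc_py (s : String) (c : String) : Prop := s ≠ ""
instance (s : String) (c : String) : Decidable (Pre_calc_py s c) := by
  unfold Pre_calc_py; infer_instance

def pvWitness_calc_py : String × String := ("aabcaab", "a")

def Spec_calc_py (s : String) (c : String) (out : List Int) : Prop := out = calc_py_alt s c
instance (s : String) (c : String) (out : List Int) : Decidable (Spec_calc_py s c out) := by
  unfold Spec_calc_py; infer_instance

-- ===== CLAIM (what is proved, stated in full; the proofs are below) =====
def Claim_equal_calc_py : Prop :=
  ∀ (s : String) (c : String), Dom_calc_py s c → Pre_calc_py s c → Spec_calc_py s c (calc_py s c)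

-- ===== LEMMAS AND PROOFS =====

-- the per-block dp update, common reference semantics for both loops
def pvDpStep (dp : List Int) (first : Bool) (x y : Int) : List Int :=
  if first then (if x ≠ 0 then dp ++ [y] else dp) else dp ++ [dp.getLast! + x + y]

-- reference semantics: consume a maximal non-c gap then a maximal c-run, update dp, repeat
theorem pv_go_dec (p : Char → Bool) (t : List Char) (ht : t ≠ []) :
    ((t.dropWhile (fun ch => p ch == false)).dropWhile (fun ch => p ch == true)).length
      < t.length := by
  cases t with
  | nil => exact absurd rfl ht
  | cons ch tl =>
    by_cases hp : p ch = true
    · have h1 : (ch :: tl).dropWhile (fun ch => p ch == false) = ch :: tl := by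
        rw [List.dropWhile_cons_of_neg]; simp [hp]
      rw [h1, List.dropWhile_cons_of_pos (by simp [hp])]
      have := List.length_dropWhile_le (fun ch => p ch == true) tl
      simp only [List.length_cons]
      omega
    · have h1 : (ch :: tl).dropWhile (fun ch => p ch == false) =
          tl.dropWhile (fun ch => p ch == false) := by
        rw [List.dropWhile_cons_of_pos]; simp [hp]
      rw [h1]
      have h2 := List.length_dropWhile_le (fun ch => p ch == false) tl
      have h3 := List.length_dropWhile_le (fun ch => p ch == true)
        (tl.dropWhile (fun ch => p ch == false))
      simp only [List.length_cons]
      omega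

def pvGo (p : Char → Bool) (t : List Char) (dp : List Int) (first : Bool) : List Int :=
  if ht : t = [] then dp
  else
    let a := t.takeWhile (fun ch => p ch == false)
    let rest := t.dropWhile (fun ch => p ch == false)
    let b := rest.takeWhile (fun ch => p ch == true)
    let rest' := rest.dropWhile (fun ch => p ch == true)
    pvGo p rest' (pvDpStep dp first (a.length : Int) (b.length : Int)) false
termination_by t.length
decreasing_by
  exact pv_go_dec p t ht

-- ---- A-side: the index loops compute takeWhile/dropWhile spans ----

def pvP (cl : List Char) : Char → Bool := fun ch => decide ([ch] = cl)

theorem calcA_skipNot_eq (t : List Char) (cl : List Char) (j : Nat) (hj : j ≤ t.length) :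
    calcA_skipNot t cl t.length j =
      j + ((t.drop j).takeWhile (fun ch => pvP cl ch == false)).length := by
  fun_induction calcA_skipNot t cl t.length j with
  | case1 j h ih =>
    obtain ⟨hlt, hne⟩ := h
    have hd : t.drop j = t[j] :: t.drop (j + 1) := List.drop_eq_getElem_cons hlt
    have hget : t.getD j ' ' = t[j] := List.getD_eq_getElem t ' ' hlt
    have hne' : ¬ [t[j]] = cl := by rw [← hget]; exact hne
    rw [hd, List.takeWhile_cons_of_pos (by simp [pvP, hne'])]
    rw [ih (by omega)]
    simp; omega
  | case2 j h =>
    by_cases hlt : j < t.length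
    · have hc : [t.getD j ' '] = cl := by tauto
      have hd : t.drop j = t[j] :: t.drop (j + 1) := List.drop_eq_getElem_cons hlt
      have hget : t.getD j ' ' = t[j] := List.getD_eq_getElem t ' ' hlt
      have hc' : [t[j]] = cl := by rw [← hget]; exact hc
      rw [hd, List.takeWhile_cons_of_neg (by simp [pvP, hc'])]
      simp
    · have : j = t.length := by omega
      subst this
      simp

theorem calcA_skipC_eq (t : List Char) (cl : List Char) (k : Nat) (hk : k ≤ t.length) :
    calcA_skipC t cl t.length k =
      k + ((t.drop k).takeWhile (fun ch => pvP cl ch == true)).length := by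
  fun_induction calcA_skipC t cl t.length k with
  | case1 k h ih =>
    obtain ⟨hlt, heq⟩ := h
    have hd : t.drop k = t[k] :: t.drop (k + 1) := List.drop_eq_getElem_cons hlt
    have hget : t.getD k ' ' = t[k] := List.getD_eq_getElem t ' ' hlt
    have heq' : [t[k]] = cl := by rw [← hget]; exact heq
    rw [hd, List.takeWhile_cons_of_pos (by simp [pvP, heq'])]
    rw [ih (by omega)]
    simp; omega
  | case2 k h =>
    by_cases hlt : k < t.length
    · have hc : ¬ [t.getD k ' '] = cl := by tauto
      have hd : t.drop k = t[k] :: t.drop (k + 1) := List.drop_eq_getElem_cons hlt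
      have hget : t.getD k ' ' = t[k] := List.getD_eq_getElem t ' ' hlt
      have hc' : ¬ [t[k]] = cl := by rw [← hget]; exact hc
      rw [hd, List.takeWhile_cons_of_neg (by simp [pvP, hc'])]
      simp
    · have : k = t.length := by omega
      subst this
      simp

theorem calcA_loop_eq_go (t : List Char) (cl : List Char) (i : Nat) (dp : List Int)
    (hi : i ≤ t.length) :
    calcA_loop t cl t.length dp i = pvGo (pvP cl) (t.drop i) dp (decide (i = 0)) := by
  fun_induction calcA_loop t cl t.length dp i with
  | case1 dp i h j' k' x y dp' ih =>
    -- unfold the lets' names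
    have hdrop_ne : t.drop i ≠ [] := by
      simp [List.drop_eq_nil_iff]; omega
    have hj : j' = i + ((t.drop i).takeWhile (fun ch => pvP cl ch == false)).length :=
      calcA_skipNot_eq t cl i (by omega)
    have hja : j' ≤ t.length := by
      have := (List.takeWhile_sublist (l := t.drop i)
        (fun ch => pvP cl ch == false)).length_le
      simp only [List.length_drop] at this
      omega
    have hdj : t.drop j' = (t.drop i).dropWhile (fun ch => pvP cl ch == false) := by
      have hsplit := List.takeWhile_append_dropWhile
        (p := fun ch => pvP cl ch == false) (l := t.drop i)
      calc t.drop j'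
          = ((t.drop i).takeWhile (fun ch => pvP cl ch == false) ++
              (t.drop i).dropWhile (fun ch => pvP cl ch == false)).drop
            ((t.drop i).takeWhile (fun ch => pvP cl ch == false)).length := by
            rw [hsplit, List.drop_drop, hj, Nat.add_comm]
        _ = (t.drop i).dropWhile (fun ch => pvP cl ch == false) := List.drop_left
    have hk : k' = j' +
        ((t.drop j').takeWhile (fun ch => pvP cl ch == true)).length :=
      calcA_skipC_eq t cl j' hja
    have hka : k' ≤ t.length := by
      have := (List.takeWhile_sublist (l := t.drop j')
        (fun ch => pvP cl ch == true)).length_le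
      simp only [List.length_drop] at this
      omega
    have hdk : t.drop k' = ((t.drop i).dropWhile (fun ch => pvP cl ch == false)).dropWhile
        (fun ch => pvP cl ch == true) := by
      have hsplit := List.takeWhile_append_dropWhile
        (p := fun ch => pvP cl ch == true) (l := t.drop j')
      calc t.drop k'
          = ((t.drop j').takeWhile (fun ch => pvP cl ch == true) ++
              (t.drop j').dropWhile (fun ch => pvP cl ch == true)).drop
            ((t.drop j').takeWhile (fun ch => pvP cl ch == true)).length := by
            rw [hsplit, List.drop_drop, hk, Nat.add_comm]
        _ = (t.drop j').dropWhile (fun ch => pvP cl ch == true) := List.drop_left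
        _ = ((t.drop i).dropWhile (fun ch => pvP cl ch == false)).dropWhile
            (fun ch => pvP cl ch == true) := by rw [hdj]
    have hkpos : 0 < k' :=
      Nat.lt_of_le_of_lt (Nat.zero_le i) (calcA_progress t cl t.length i h)
    have hx : x = (((t.drop i).takeWhile (fun ch => pvP cl ch == false)).length : Int) := by
      show ((j' : Int) - (i : Int)) = _
      rw [hj]; push_cast; ring
    have hy : y = (((t.drop i).dropWhile (fun ch => pvP cl ch == false)).takeWhile
        (fun ch => pvP cl ch == true)).length := by
      show ((k' : Int) - (j' : Int)) = _
      rw [hk, ← hdj]; push_cast; ring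
    have hdp : dp' = pvDpStep dp (decide (i = 0))
        (((t.drop i).takeWhile (fun ch => pvP cl ch == false)).length : Int)
        (((t.drop i).dropWhile (fun ch => pvP cl ch == false)).takeWhile
          (fun ch => pvP cl ch == true)).length := by
      show (if i > 0 then dp ++ [dp.getLast! + x + y]
            else if x ≠ 0 then dp ++ [y] else dp) = _
      rw [hx, hy, pvDpStep]
      by_cases hi0 : i = 0
      · subst hi0
        simp
      · have : i > 0 := Nat.pos_of_ne_zero hi0
        simp [hi0, this]
    rw [ih hka]
    conv_rhs => rw [pvGo]
    rw [dif_neg hdrop_ne]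
    dsimp only
    rw [← hdj] at hdp ⊢
    rw [hdk, hdp]
    have hkne : (decide (k' = 0)) = false := by
      simp only [decide_eq_false_iff_not]
      omega
    rw [hkne, hdj]
  | case2 dp i h =>
    have : i = t.length := by omega
    subst this
    simp [pvGo]

-- ---- B-side: pass 1 is run-length encoding ----

def pvConsRle (r : Bool × Int) (rl : List (Bool × Int)) : List (Bool × Int) :=
  match rl with
  | (k', c') :: rs => if k' = r.1 then (r.1, r.2 + c') :: rs else r :: (k', c') :: rs
  | [] => [r]

def pvRle (p : Char → Bool) : List Char → List (Bool × Int)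
  | [] => []
  | ch :: rest => pvConsRle (p ch, 1) (pvRle p rest)

theorem pvConsRle_head_fst (r : Bool × Int) (rl : List (Bool × Int)) :
    (pvConsRle r rl).head?.map Prod.fst = some r.1 := by
  cases rl with
  | nil => simp [pvConsRle]
  | cons hd tl =>
    obtain ⟨k', c'⟩ := hd
    by_cases h : k' = r.1 <;> simp [pvConsRle, h]

theorem pvConsRle_consRle (k : Bool) (cnt : Int) (q : Bool) (rl : List (Bool × Int)) :
    pvConsRle (k, cnt) (pvConsRle (q, 1) rl) =
      if q = k then pvConsRle (k, cnt + 1) rl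
      else (k, cnt) :: pvConsRle (q, 1) rl := by
  match rl with
  | [] =>
    by_cases hq : q = k <;> simp [pvConsRle, hq]
  | (k', c') :: rs =>
    by_cases hk' : k' = q
    · subst hk'
      by_cases hq : k' = k
      · subst hq
        simp [pvConsRle]
        ring_nf
      · simp [pvConsRle, hq]
    · by_cases hq : q = k
      · subst hq
        simp [pvConsRle, hk']
      · simp [pvConsRle, hk', hq]

theorem calcB_foldl_eq (cl : List Char) (t : List Char) :
    ∀ (acc : List (Bool × Int)) (k : Bool) (cnt : Int),
      t.foldl (calcB_step cl) (acc ++ [(k, cnt)]) =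
        acc ++ pvConsRle (k, cnt) (pvRle (pvP cl) t) := by
  induction t with
  | nil => intro acc k cnt; simp [pvRle, pvConsRle]
  | cons ch rest ih =>
    intro acc k cnt
    rw [List.foldl_cons]
    have hstep : calcB_step cl (acc ++ [(k, cnt)]) ch =
        if pvP cl ch = k then acc ++ [(k, cnt + 1)]
        else (acc ++ [(k, cnt)]) ++ [(pvP cl ch, 1)] := by
      simp only [pvP]
      unfold calcB_step
      rw [List.getLast?_concat]
      simp only [List.dropLast_concat]
      by_cases hq : decide ([ch] = cl) = k
      · subst hq
        simp
      · rw [if_neg (fun hxx => hq hxx.symm), if_neg hq]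
    rw [hstep]
    by_cases hq : pvP cl ch = k
    · rw [if_pos hq, ih acc k (cnt + 1)]
      rw [show pvRle (pvP cl) (ch :: rest) = pvConsRle (pvP cl ch, 1) (pvRle (pvP cl) rest)
        from rfl]
      rw [pvConsRle_consRle, if_pos hq]
    · rw [if_neg hq, ih (acc ++ [(k, cnt)]) (pvP cl ch) 1]
      rw [show pvRle (pvP cl) (ch :: rest) = pvConsRle (pvP cl ch, 1) (pvRle (pvP cl) rest)
        from rfl]
      rw [pvConsRle_consRle, if_neg hq]
      simp

theorem calcB_runs_eq (t : List Char) (cl : List Char) :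
    calcB_runs t cl = pvRle (pvP cl) t := by
  cases t with
  | nil => simp [calcB_runs, pvRle]
  | cons ch rest =>
    unfold calcB_runs
    rw [List.foldl_cons]
    have h0 : calcB_step cl [] ch = [] ++ [(pvP cl ch, 1)] := by
      unfold calcB_step
      simp [pvP]
    rw [h0, calcB_foldl_eq]
    rw [show pvRle (pvP cl) (ch :: rest) = pvConsRle (pvP cl ch, 1) (pvRle (pvP cl) rest)
      from rfl]
    simp

-- ---- B-side: pass 2 over the run list ----

def pvGoRuns : List (Bool × Int) → List Int → Bool → List Int
  | [], dp, _ => dp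
  | (true, y) :: rest, dp, first => pvGoRuns rest (pvDpStep dp first 0 y) false
  | (false, x) :: rest, dp, first =>
    match rest with
    | (_, y) :: rest' => pvGoRuns rest' (pvDpStep dp first x y) false
    | [] => pvDpStep dp first x 0

theorem calcB_loop_eq_goRuns (runs : List (Bool × Int)) :
    ∀ (i : Nat) (dp : List Int) (first : Bool),
      calcB_loop runs dp i first = pvGoRuns (runs.drop i) dp first := by
  intro i
  induction hn : runs.length - i using Nat.strong_induction_on generalizing i with
  | _ n ih =>
    intro dp first
    by_cases h : i < runs.length
    · have hd : runs.drop i = runs[i] :: runs.drop (i + 1) := List.drop_eq_getElem_cons h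
      have hgetD : runs.getD i (false, 0) = runs[i] := by simp [List.getD, h]
      rw [calcB_loop, dif_pos h]
      cases hki : (runs[i]).1 with
      | true =>
        have htake : calcB_take runs i = (0, (runs[i]).2, i + 1) := by
          unfold calcB_take
          rw [hgetD, if_pos hki]
        rw [htake]
        have := ih (runs.length - (i + 1)) (by omega) (i + 1) rfl
        rw [this]
        rw [hd]
        have : runs[i] = (true, (runs[i]).2) := by
          rw [← hki]
        rw [this]
        rw [pvGoRuns]
        congr 1
        simp [pvDpStep]
        by_cases hf : first = true <;> simp [hf]
      | false =>
        by_cases h2 : i + 1 < runs.length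
        · have htake : calcB_take runs i = ((runs[i]).2, (runs[i + 1]).2, i + 2) := by
            unfold calcB_take
            rw [hgetD, if_neg (by simp [hki]), if_pos h2]
            simp [List.getD, h2]
          rw [htake]
          have := ih (runs.length - (i + 2)) (by omega) (i + 2) rfl
          rw [this]
          rw [hd]
          have hd2 : runs.drop (i + 1) = runs[i + 1] :: runs.drop (i + 2) :=
            List.drop_eq_getElem_cons h2
          rw [hd2]
          have h3 : runs[i] = (false, (runs[i]).2) := by rw [← hki]
          rw [h3]
          have h4 : runs[i+1] = ((runs[i+1]).1, (runs[i + 1]).2) := rfl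
          rw [h4]
          rw [pvGoRuns]
          congr 1
          simp [pvDpStep]
          by_cases hf : first = true <;> simp [hf]
        · have hlen : runs.length = i + 1 := by omega
          have htake : calcB_take runs i = ((runs[i]).2, 0, i + 1) := by
            unfold calcB_take
            rw [hgetD, if_neg (by simp [hki]), if_neg h2]
          rw [htake]
          have := ih (runs.length - (i + 1)) (by omega) (i + 1) rfl
          rw [this]
          have hnil : runs.drop (i + 1) = [] := by
            simp [List.drop_eq_nil_iff]; omega
          rw [hd, hnil]
          have h3 : runs[i] = (false, (runs[i]).2) := by rw [← hki]
          rw [h3]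
          rw [pvGoRuns, pvGoRuns]
          simp [pvDpStep]
          by_cases hf : first = true <;> simp [hf]
    · rw [calcB_loop, dif_neg h]
      have hnil : runs.drop i = [] := by simp [List.drop_eq_nil_iff]; omega
      rw [hnil, pvGoRuns]

-- ---- the RLE list, consumed run by run, is the span semantics ----

theorem pvRle_span (p : Char → Bool) (k : Bool) (t : List Char)
    (ht : t ≠ []) (hk : p (t.head ht) = k) :
    pvRle p t = (k, ((t.takeWhile (fun ch => p ch == k)).length : Int)) ::
      pvRle p (t.dropWhile (fun ch => p ch == k)) := by
  induction t with
  | nil => exact absurd rfl ht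
  | cons ch rest ih =>
    simp at hk
    rw [pvRle]
    rw [List.takeWhile_cons_of_pos (by simp [hk]), List.dropWhile_cons_of_pos (by simp [hk])]
    by_cases hr : rest = []
    · subst hr
      simp [pvRle, pvConsRle, hk]
    · by_cases hh : p (rest.head hr) = k
      · rw [ih hr hh, hk]
        simp only [pvConsRle, if_true, List.length_cons]
        congr 1
        · congr 1
          push_cast
          ring
      · have htw : rest.takeWhile (fun ch => p ch == k) = [] := by
          cases rest with
          | nil => rfl
          | cons c2 r2 =>
            simp at hh
            rw [List.takeWhile_cons_of_neg (by simp [hh])]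
        have hdw : rest.dropWhile (fun ch => p ch == k) = rest := by
          cases rest with
          | nil => rfl
          | cons c2 r2 =>
            simp at hh
            rw [List.dropWhile_cons_of_neg (by simp [hh])]
        rw [htw, hdw]
        simp
        -- pvConsRle (k,1) (pvRle p rest) = (k,1) :: pvRle p rest since head key ≠ k
        cases hrle : pvRle p rest with
        | nil => simp [pvConsRle, hk]
        | cons r0 rs =>
          obtain ⟨r0k, r0v⟩ := r0
          have hhead := pvConsRle_head_fst (p (rest.head hr), 1) (pvRle p rest.tail)
          have heq : pvRle p rest = pvConsRle (p (rest.head hr), 1) (pvRle p rest.tail) := by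
            cases rest with
            | nil => exact absurd rfl hr
            | cons c2 r2 => rfl
          rw [heq] at hrle
          rw [hrle] at hhead
          simp at hhead
          have hne : r0k ≠ k := by
            rw [hhead]
            exact hh
          simp [pvConsRle, hk, hne]

theorem pvGoRuns_rle_eq_go (p : Char → Bool) (t : List Char) :
    ∀ (dp : List Int) (first : Bool),
      pvGoRuns (pvRle p t) dp first = pvGo p t dp first := by
  induction hn : t.length using Nat.strong_induction_on generalizing t with
  | _ n ih =>
    intro dp first
    by_cases ht : t = []
    · subst ht; simp [pvRle, pvGoRuns, pvGo]
    · rw [pvGo, dif_neg ht]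
      dsimp only
      cases hk : p (t.head ht) with
      | true =>
        have hspan := pvRle_span p true t ht hk
        have ha : t.takeWhile (fun ch => p ch == false) = [] := by
          cases t with
          | nil => exact absurd rfl ht
          | cons ch rest =>
            simp at hk
            rw [List.takeWhile_cons_of_neg (by simp [hk])]
        have hrest : t.dropWhile (fun ch => p ch == false) = t := by
          cases t with
          | nil => exact absurd rfl ht
          | cons ch rest =>
            simp at hk
            rw [List.dropWhile_cons_of_neg (by simp [hk])]
        rw [hspan, pvGoRuns]
        rw [ha, hrest]
        have hlen : (t.dropWhile (fun ch => p ch == true)).length < t.length := by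
          cases t with
          | nil => exact absurd rfl ht
          | cons ch rest =>
            simp at hk
            rw [List.dropWhile_cons_of_pos (by simp [hk])]
            have := List.length_dropWhile_le (fun ch => p ch == true) rest
            simp only [List.length_cons]
            omega
        rw [ih _ (hn ▸ hlen) _ rfl]
        simp
      | false =>
        have hspan := pvRle_span p false t ht hk
        rw [hspan]
        by_cases hr0 : t.dropWhile (fun ch => p ch == false) = []
        · rw [hr0]
          rw [show pvRle p ([] : List Char) = [] from rfl]
          rw [pvGoRuns]
          simp only [List.takeWhile_nil, List.dropWhile_nil]
          rw [pvGo]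
          simp
        · have hhp : p ((t.dropWhile (fun ch => p ch == false)).head hr0) = true := by
            have := List.head_dropWhile_not (p := fun ch => p ch == false) (l := t) hr0
            simpa using this
          have hspan2 := pvRle_span p true _ hr0 hhp
          rw [hspan2, pvGoRuns]
          have hlen : ((t.dropWhile (fun ch => p ch == false)).dropWhile
              (fun ch => p ch == true)).length < t.length := pv_go_dec p t ht
          rw [ih _ (hn ▸ hlen) _ rfl]

-- ===== VERDICT (by name: the statement is the Claim_ definition above) =====
theorem calc_py_spec : Claim_equal_calc_py := by
  intro s c _hdom _hpre
  unfold Spec_calc_py calc_py calc_py_alt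
  dsimp only
  rw [calcA_loop_eq_go _ _ 0 _ (by omega)]
  rw [calcB_runs_eq, calcB_loop_eq_goRuns]
  simp only [List.drop_zero]
  rw [pvGoRuns_rle_eq_go]
  simp
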